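-- pv_equiv track=rewrite | github.com/itu-itis24-attar22/resource-allocation-system | web/app.py | build_user_display_rows
-- ===== SOURCE A (Python) =====
-- def display_value(value, fallback="N/A"):
--     stripped = (value or "").strip()
--     if not stripped or stripped == "None":
--         return fallback
--     return stripped
--
-- def build_user_specific_details(user):
--     role = (user.get("role") or "").strip()
--     detail_fields = []
--
--     if role == "Student":
--         detail_fields = [
--             ("Student No", user.get("studentNo")),
--             ("Program", user.get("program")),
--             ("Year", user.get("yearLevel")),
--         ]
--     elif role == "TeachingAssistant":
--         detail_fields = [
--             ("Assistant Type", user.get("assistantType")),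
--             ("Office", user.get("officeRoom")),
--         ]
--     elif role == "Instructor":
--         detail_fields = [
--             ("Title", user.get("title")),
--             ("Office", user.get("officeRoom")),
--         ]
--     elif role == "Staff":
--         detail_fields = [
--             ("Job Title", user.get("jobTitle")),
--         ]
--     elif role == "Administrator":
--         detail_fields = [
--             ("Admin Level", user.get("adminLevel")),
--         ]
--
--     details = [
--         f"{label}: {value.strip()}"
--         for label, value in detail_fields
--         if (value or "").strip()
--     ]
--
--     return "; ".join(details) if details else "N/A"
--
-- def build_user_display_rows(rows):
--     return [
--         {
--             "userId": display_value(row.get("userId")),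
--             "name": display_value(row.get("name")),
--             "role": display_value(row.get("role")),
--             "email": display_value(row.get("email")),
--             "status": display_value(row.get("status")),
--             "primaryUnit": display_value(row.get("primaryUnit")),
--             "assignedRoles": display_value(row.get("assignedRoles")),
--             "details": build_user_specific_details(row),
--         }
--         for row in rows
--     ]
-- ===== SOURCE B (Python) =====
-- _COL_KEYS = ("userId", "name", "role", "email", "status",
--              "primaryUnit", "assignedRoles")
--
-- _ROLE_FIELDS = {
--     "Student": (("Student No", "studentNo"), ("Program", "program"),
--                 ("Year", "yearLevel")),
--     "TeachingAssistant": (("Assistant Type", "assistantType"),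
--                           ("Office", "officeRoom")),
--     "Instructor": (("Title", "title"), ("Office", "officeRoom")),
--     "Staff": (("Job Title", "jobTitle"),),
--     "Administrator": (("Admin Level", "adminLevel"),),
-- }
--
--
-- def _clean(value):
--     return (value or "").strip()
--
--
-- def _display(value):
--     s = _clean(value)
--     return "N/A" if s in ("", "None") else s
--
--
-- def _details(user):
--     # build the details string directly with an accumulator (no list, no join)
--     acc = ""
--     for label, key in _ROLE_FIELDS.get(_clean(user.get("role")), ()):
--         v = _clean(user.get(key))
--         if v:
--             acc = f"{label}: {v}" if not acc else f"{acc}; {label}: {v}"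
--     return acc or "N/A"
--
--
-- def build_user_display_rows(rows):
--     # column-major: compute each output column over all rows, then transpose
--     columns = [[_display(r.get(k)) for r in rows] for k in _COL_KEYS]
--     columns.append([_details(r) for r in rows])
--     return [dict(zip(_COL_KEYS + ("details",), vals)) for vals in zip(*columns)]
-- ===== Notes on version B (the rewrite author's own statement) =====
-- stated objective: alternative
-- what changed: B is column-major: it computes each output column over all rows and transposes with zip into the row dicts (A builds each row dict directly), and it builds the details string with a running string accumulator in one loop over a role->fields table instead of A's if/elif dispatch plus filtered list comprehension plus '; '.join.
import Mathlib
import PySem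

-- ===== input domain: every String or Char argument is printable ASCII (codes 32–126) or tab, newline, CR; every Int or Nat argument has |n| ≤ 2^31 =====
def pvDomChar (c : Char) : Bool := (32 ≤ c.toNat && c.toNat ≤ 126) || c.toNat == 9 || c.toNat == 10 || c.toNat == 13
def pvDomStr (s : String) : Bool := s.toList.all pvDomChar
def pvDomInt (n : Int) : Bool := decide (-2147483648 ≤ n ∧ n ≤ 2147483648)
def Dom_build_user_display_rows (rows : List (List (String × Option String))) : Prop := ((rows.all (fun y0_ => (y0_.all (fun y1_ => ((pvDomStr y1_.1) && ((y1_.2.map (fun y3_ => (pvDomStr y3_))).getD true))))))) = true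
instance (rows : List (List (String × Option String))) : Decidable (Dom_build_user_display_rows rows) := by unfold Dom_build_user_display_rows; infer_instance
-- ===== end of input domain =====

-- B is column-major (one pass per output column, then a zip transpose) and builds the details
-- string with a running accumulator over a role->fields table instead of if/elif + list + join;
-- an alternative decomposition, same values, same complexity.

-- ===== PORT A =====
-- row.get(k): dict lookup (first match) may give none (key absent) or some none (stored None);
-- `value or ""` collapses both none and some "" to "" — exact via .bind id and .getD "".
def pvGetA (user : List (String × Option String)) (k : String) : Option String :=
  ((PySem.Dict.mk user).get? k).bind id

def display_value_port (value : Option String) : String :=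
  let stripped := PySem.Str.strip (value.getD "")
  if stripped = "" ∨ stripped = "None" then "N/A" else stripped

def build_user_specific_details_port (user : List (String × Option String)) : String :=
  let role := PySem.Str.strip ((pvGetA user "role").getD "")
  let detail_fields : List (String × Option String) :=
    if role = "Student" then
      [("Student No", pvGetA user "studentNo"), ("Program", pvGetA user "program"),
       ("Year", pvGetA user "yearLevel")]
    else if role = "TeachingAssistant" then
      [("Assistant Type", pvGetA user "assistantType"), ("Office", pvGetA user "officeRoom")]
    else if role = "Instructor" then
      [("Title", pvGetA user "title"), ("Office", pvGetA user "officeRoom")]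
    else if role = "Staff" then
      [("Job Title", pvGetA user "jobTitle")]
    else if role = "Administrator" then
      [("Admin Level", pvGetA user "adminLevel")]
    else []
  let details :=
    (detail_fields.filter (fun lv => PySem.Str.strip (lv.2.getD "") ≠ "")).map
      (fun lv => lv.1 ++ ": " ++ PySem.Str.strip (lv.2.getD ""))
  if details ≠ [] then PySem.Str.join "; " details else "N/A"

def build_user_display_rows (rows : List (List (String × Option String))) : List (List (String × String)) :=
  rows.map (fun row =>
    [("userId", display_value_port (pvGetA row "userId")),
     ("name", display_value_port (pvGetA row "name")),
     ("role", display_value_port (pvGetA row "role")),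
     ("email", display_value_port (pvGetA row "email")),
     ("status", display_value_port (pvGetA row "status")),
     ("primaryUnit", display_value_port (pvGetA row "primaryUnit")),
     ("assignedRoles", display_value_port (pvGetA row "assignedRoles")),
     ("details", build_user_specific_details_port row)])

-- ===== PORT B =====
def pvColKeys : List String :=
  ["userId", "name", "role", "email", "status", "primaryUnit", "assignedRoles"]

def pvRoleFields : List (String × List (String × String)) :=
  [("Student", [("Student No", "studentNo"), ("Program", "program"), ("Year", "yearLevel")]),
   ("TeachingAssistant", [("Assistant Type", "assistantType"), ("Office", "officeRoom")]),
   ("Instructor", [("Title", "title"), ("Office", "officeRoom")]),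
   ("Staff", [("Job Title", "jobTitle")]),
   ("Administrator", [("Admin Level", "adminLevel")])]

def pvGetB (user : List (String × Option String)) (k : String) : Option String :=
  ((PySem.Dict.mk user).get? k).bind id

def pvCleanB (value : Option String) : String :=
  PySem.Str.strip (value.getD "")

def pvDisplayB (value : Option String) : String :=
  let s := pvCleanB value
  if s = "" ∨ s = "None" then "N/A" else s

def pvDetailsB (user : List (String × Option String)) : String :=
  let fields := ((PySem.Dict.mk pvRoleFields).get? (pvCleanB (pvGetB user "role"))).getD []
  let acc := fields.foldl (fun acc lk =>
      let v := pvCleanB (pvGetB user lk.2)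
      if v = "" then acc
      else if acc = "" then lk.1 ++ ": " ++ v
      else acc ++ "; " ++ (lk.1 ++ ": " ++ v)) ""
  if acc = "" then "N/A" else acc

-- zip(*columns): truncating transpose, exactly Python's zip of the column lists
def pvZip : List (List String) → List (List String)
  | [] => []
  | c :: rest =>
    if (c :: rest).any (fun x => x.isEmpty) then []
    else (c :: rest).map (fun x => x.headD "") :: pvZip ((c :: rest).map (fun x => x.tail))
termination_by cols => (cols.headD []).length
decreasing_by
  simp_all [List.isEmpty_iff]
  cases c with
  | nil => simp_all
  | cons a t => simp

def build_user_display_rows_alt (rows : List (List (String × Option String))) : List (List (String × String)) :=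
  let columns :=
    pvColKeys.map (fun k => rows.map (fun r => pvDisplayB (pvGetB r k)))
      ++ [rows.map pvDetailsB]
  (pvZip columns).map (fun vals => (pvColKeys ++ ["details"]).zip vals)

-- ===== PRECONDITION & SPEC =====
def Spec_build_user_display_rows (rows : List (List (String × Option String))) (out : List (List (String × String))) : Prop := out = build_user_display_rows_alt rows
instance (rows : List (List (String × Option String))) (out : List (List (String × String))) : Decidable (Spec_build_user_display_rows rows out) := by unfold Spec_build_user_display_rows; infer_instance

-- ===== CLAIM (what is proved, stated in full; the proofs are below) =====
def Claim_equal_build_user_display_rows : Prop := ∀ (rows : List (List (String × Option String))), Dom_build_user_display_rows rows → Spec_build_user_display_rows rows (build_user_display_rows rows)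

-- ===== LEMMAS AND PROOFS =====

-- the column functions behind B's `columns` (proof-only helper)
def pvColFuns : List (List (String × Option String) → String) :=
  pvColKeys.map (fun k => fun r => pvDisplayB (pvGetB r k)) ++ [pvDetailsB]

theorem pvZip_columns {α : Type} (fs : List (α → String)) (hfs : fs ≠ [])
    (rows : List α) :
    pvZip (fs.map (fun f => rows.map f))
      = rows.map (fun r => fs.map (fun f => f r)) := by
  induction rows with
  | nil =>
    cases fs with
    | nil => exact absurd rfl hfs
    | cons f ft => simp [pvZip]
  | cons r rs ih =>
    cases fs with
    | nil => exact absurd rfl hfs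
    | cons f ft =>
      have hre : ((f :: ft).map (fun g => (r :: rs).map g))
          = (f r :: rs.map f) :: ft.map (fun g => g r :: rs.map g) := by simp
      rw [hre, pvZip]
      have hany : (((f r :: rs.map f) :: ft.map (fun g => g r :: rs.map g)).any
          (fun x => x.isEmpty)) = false := by
        simp [List.any_map]
      rw [if_neg (by simp [hany])]
      have h1 : ((f r :: rs.map f) :: ft.map (fun g => g r :: rs.map g)).map
            (fun x => x.headD "") = (f :: ft).map (fun g => g r) := by
        simp [List.map_map, Function.comp]
      have h2 : ((f r :: rs.map f) :: ft.map (fun g => g r :: rs.map g)).map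
            (fun x => x.tail) = (f :: ft).map (fun g => rs.map g) := by
        simp [List.map_map, Function.comp]
      rw [h1, h2, ih]
      simp

theorem pvDisplay_eq (v : Option String) : pvDisplayB v = display_value_port v := by
  unfold pvDisplayB pvCleanB display_value_port
  by_cases h1 : PySem.Str.strip (v.getD "") = "" <;>
    by_cases h2 : PySem.Str.strip (v.getD "") = "None" <;>
      simp [h1, h2]

theorem pvStr_app_ne_right (a b : String) (hb : b ≠ "") : a ++ b ≠ "" := by
  intro h
  have h2 := congrArg String.toList h
  rw [String.toList_append] at h2
  have hb' : b.toList = [] := (List.eq_nil_of_append_eq_nil h2).2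
  exact hb (String.toList_inj.mp (by simp [hb']))

theorem pvStr_app_ne_left (a b : String) (ha : a ≠ "") : a ++ b ≠ "" := by
  intro h
  have h2 := congrArg String.toList h
  rw [String.toList_append] at h2
  have ha' : a.toList = [] := (List.eq_nil_of_append_eq_nil h2).1
  exact ha (String.toList_inj.mp (by simp [ha']))

theorem pvJoin_singleton (x : String) : PySem.Str.join "; " [x] = x := by
  apply String.toList_inj.mp
  rw [PySem.Str.toList_join]
  simp [PySem.Chars.join_singleton]

theorem pvJoin_cons (x y : String) (ys : List String) :
    PySem.Str.join "; " (x :: y :: ys) = x ++ "; " ++ PySem.Str.join "; " (y :: ys) := by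
  apply String.toList_inj.mp
  rw [String.toList_append, String.toList_append, PySem.Str.toList_join, PySem.Str.toList_join]
  simp [PySem.Chars.join_cons_cons]

theorem pvJoin_cons' (x : String) (ys : List String) (h : ys ≠ []) :
    PySem.Str.join "; " (x :: ys) = x ++ "; " ++ PySem.Str.join "; " ys := by
  cases ys with
  | nil => exact absurd rfl h
  | cons y ys => exact pvJoin_cons x y ys

theorem pvJoin_ne_empty (ps : List String) (hne : ps ≠ [])
    (hmem : ∀ p ∈ ps, p ≠ "") : PySem.Str.join "; " ps ≠ "" := by
  cases ps with
  | nil => exact absurd rfl hne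
  | cons p rest =>
    cases rest with
    | nil => rw [pvJoin_singleton]; exact hmem p (by simp)
    | cons q qs =>
      rw [pvJoin_cons]
      exact pvStr_app_ne_left _ _ (pvStr_app_ne_left _ _ (hmem p (by simp)))

-- the accumulator fold equals acc glued onto the join of the filtered, formatted parts
theorem pvFold_glue (user : List (String × Option String)) (f : List (String × String)) :
    ∀ acc : String,
    f.foldl (fun acc lk =>
        let v := pvCleanB (pvGetB user lk.2)
        if v = "" then acc
        else if acc = "" then lk.1 ++ ": " ++ v
        else acc ++ "; " ++ (lk.1 ++ ": " ++ v)) acc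
      = (if (f.filter (fun lk => pvCleanB (pvGetB user lk.2) ≠ "")).map
            (fun lk => lk.1 ++ ": " ++ pvCleanB (pvGetB user lk.2)) = [] then acc
         else if acc = "" then
           PySem.Str.join "; " ((f.filter (fun lk => pvCleanB (pvGetB user lk.2) ≠ "")).map
             (fun lk => lk.1 ++ ": " ++ pvCleanB (pvGetB user lk.2)))
         else acc ++ "; " ++
           PySem.Str.join "; " ((f.filter (fun lk => pvCleanB (pvGetB user lk.2) ≠ "")).map
             (fun lk => lk.1 ++ ": " ++ pvCleanB (pvGetB user lk.2)))) := by
  induction f with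
  | nil => intro acc; simp
  | cons hd tl ih =>
    intro acc
    rw [List.foldl_cons]
    by_cases hv : pvCleanB (pvGetB user hd.2) = ""
    · have hstep : (let v := pvCleanB (pvGetB user hd.2)
          if v = "" then acc
          else if acc = "" then hd.1 ++ ": " ++ v
          else acc ++ "; " ++ (hd.1 ++ ": " ++ v)) = acc := by simp [hv]
      have hfil : List.filter (fun lk => decide (pvCleanB (pvGetB user lk.2) ≠ "")) (hd :: tl)
          = List.filter (fun lk => decide (pvCleanB (pvGetB user lk.2) ≠ "")) tl := by
        rw [List.filter_cons]; simp [hv]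
      rw [hstep, ih acc, hfil]
    · have hp : hd.1 ++ ": " ++ pvCleanB (pvGetB user hd.2) ≠ "" :=
        pvStr_app_ne_right _ _ hv
      have hfil : List.filter (fun lk => decide (pvCleanB (pvGetB user lk.2) ≠ "")) (hd :: tl)
          = hd :: List.filter (fun lk => decide (pvCleanB (pvGetB user lk.2) ≠ "")) tl := by
        rw [List.filter_cons]; simp [hv]
      by_cases hacc : acc = ""
      · have hstep : (let v := pvCleanB (pvGetB user hd.2)
            if v = "" then acc
            else if acc = "" then hd.1 ++ ": " ++ v
            else acc ++ "; " ++ (hd.1 ++ ": " ++ v))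
              = hd.1 ++ ": " ++ pvCleanB (pvGetB user hd.2) := by simp [hv, hacc]
        rw [hstep, ih _, hfil]
        dsimp only [List.map_cons]
        by_cases hps : (tl.filter (fun lk => decide (pvCleanB (pvGetB user lk.2) ≠ ""))).map
            (fun lk => lk.1 ++ ": " ++ pvCleanB (pvGetB user lk.2)) = []
        · rw [if_pos hps, if_neg (by simp), if_pos hacc, hps, pvJoin_singleton]
        · rw [if_neg hps, if_neg hp, if_neg (by simp), if_pos hacc,
              pvJoin_cons' _ _ hps]
      · have hstep : (let v := pvCleanB (pvGetB user hd.2)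
            if v = "" then acc
            else if acc = "" then hd.1 ++ ": " ++ v
            else acc ++ "; " ++ (hd.1 ++ ": " ++ v))
              = acc ++ "; " ++ (hd.1 ++ ": " ++ pvCleanB (pvGetB user hd.2)) := by
          simp [hv, hacc]
        rw [hstep, ih _, hfil]
        dsimp only [List.map_cons]
        have hglue : acc ++ "; " ++ (hd.1 ++ ": " ++ pvCleanB (pvGetB user hd.2)) ≠ "" :=
          pvStr_app_ne_right _ _ hp
        by_cases hps : (tl.filter (fun lk => decide (pvCleanB (pvGetB user lk.2) ≠ ""))).map
            (fun lk => lk.1 ++ ": " ++ pvCleanB (pvGetB user lk.2)) = []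
        · rw [if_pos hps, if_neg (by simp), if_neg hacc, hps, pvJoin_singleton]
        · rw [if_neg hps, if_neg hglue, if_neg (by simp), if_neg hacc,
              pvJoin_cons' _ _ hps]
          simp [String.append_assoc]

set_option maxHeartbeats 1000000 in
theorem pvTable_eq (role : String) :
    ((PySem.Dict.mk pvRoleFields).get? role).getD [] =
      (if role = "Student" then
        [("Student No", "studentNo"), ("Program", "program"), ("Year", "yearLevel")]
      else if role = "TeachingAssistant" then
        [("Assistant Type", "assistantType"), ("Office", "officeRoom")]
      else if role = "Instructor" then
        [("Title", "title"), ("Office", "officeRoom")]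
      else if role = "Staff" then
        [("Job Title", "jobTitle")]
      else if role = "Administrator" then
        [("Admin Level", "adminLevel")]
      else ([] : List (String × String))) := by
  unfold pvRoleFields
  split_ifs with h1 h2 h3 h4 h5
  · subst h1; rfl
  · subst h2; rfl
  · subst h3; rfl
  · subst h4; rfl
  · subst h5; rfl
  · simp only [PySem.Dict.get?_mk_cons, beq_iff_eq]
    rw [if_neg (fun hh => h1 hh.symm), if_neg (fun hh => h2 hh.symm),
        if_neg (fun hh => h3 hh.symm), if_neg (fun hh => h4 hh.symm),
        if_neg (fun hh => h5 hh.symm)]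
    simp [PySem.Dict.get?]

-- A's fetched detail_fields list is B's key table mapped through the lookup
theorem pvFieldsA (user : List (String × Option String)) (role : String) :
    (if role = "Student" then
       [("Student No", pvGetA user "studentNo"), ("Program", pvGetA user "program"),
        ("Year", pvGetA user "yearLevel")]
     else if role = "TeachingAssistant" then
       [("Assistant Type", pvGetA user "assistantType"), ("Office", pvGetA user "officeRoom")]
     else if role = "Instructor" then
       [("Title", pvGetA user "title"), ("Office", pvGetA user "officeRoom")]
     else if role = "Staff" then
       [("Job Title", pvGetA user "jobTitle")]
     else if role = "Administrator" then
       [("Admin Level", pvGetA user "adminLevel")]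
     else [])
    = (((PySem.Dict.mk pvRoleFields).get? role).getD []).map
        (fun lk => (lk.1, pvGetA user lk.2)) := by
  rw [pvTable_eq]
  split_ifs <;> rfl

theorem pvDetails_core (user : List (String × Option String)) (F : List (String × String)) :
    (if (F.foldl (fun acc lk =>
          let v := pvCleanB (pvGetB user lk.2)
          if v = "" then acc
          else if acc = "" then lk.1 ++ ": " ++ v
          else acc ++ "; " ++ (lk.1 ++ ": " ++ v)) "") = "" then "N/A"
     else F.foldl (fun acc lk =>
          let v := pvCleanB (pvGetB user lk.2)
          if v = "" then acc
          else if acc = "" then lk.1 ++ ": " ++ v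
          else acc ++ "; " ++ (lk.1 ++ ": " ++ v)) "")
    = (if (((F.map (fun lk => (lk.1, pvGetA user lk.2))).filter
            (fun lv => PySem.Str.strip (lv.2.getD "") ≠ "")).map
            (fun lv => lv.1 ++ ": " ++ PySem.Str.strip (lv.2.getD ""))) ≠ [] then
         PySem.Str.join "; " (((F.map (fun lk => (lk.1, pvGetA user lk.2))).filter
            (fun lv => PySem.Str.strip (lv.2.getD "") ≠ "")).map
            (fun lv => lv.1 ++ ": " ++ PySem.Str.strip (lv.2.getD "")))
       else "N/A") := by
  have hfilt :
      (((F.map (fun lk => (lk.1, pvGetA user lk.2))).filter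
          (fun lv => PySem.Str.strip (lv.2.getD "") ≠ "")).map
        (fun lv => lv.1 ++ ": " ++ PySem.Str.strip (lv.2.getD "")))
      = (F.filter (fun lk => pvCleanB (pvGetB user lk.2) ≠ "")).map
          (fun lk => lk.1 ++ ": " ++ pvCleanB (pvGetB user lk.2)) := by
    rw [List.filter_map, List.map_map]
    rfl
  rw [pvFold_glue user F ""]
  simp only [hfilt]
  set ps := (F.filter (fun lk => pvCleanB (pvGetB user lk.2) ≠ "")).map
      (fun lk => lk.1 ++ ": " ++ pvCleanB (pvGetB user lk.2)) with hpsdef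
  have hmem : ∀ p ∈ ps, p ≠ "" := by
    intro p hpmem
    rw [hpsdef] at hpmem
    simp only [List.mem_map, List.mem_filter] at hpmem
    obtain ⟨lk, ⟨_, hlk⟩, rfl⟩ := hpmem
    exact pvStr_app_ne_right _ _ (by simpa using hlk)
  by_cases hps : ps = []
  · simp [hps]
  · simp [hps, pvJoin_ne_empty ps hps hmem]

theorem pvDetails_eq (user : List (String × Option String)) :
    pvDetailsB user = build_user_specific_details_port user := by
  simp only [pvDetailsB, build_user_specific_details_port]
  simp only [pvFieldsA user (PySem.Str.strip ((pvGetA user "role").getD ""))]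
  exact pvDetails_core user _

-- per-row: B's zipped row equals A's literal row
theorem pvRow_eq (r : List (String × Option String)) :
    (pvColKeys ++ ["details"]).zip (pvColFuns.map (fun f => f r))
      = [("userId", display_value_port (pvGetA r "userId")),
         ("name", display_value_port (pvGetA r "name")),
         ("role", display_value_port (pvGetA r "role")),
         ("email", display_value_port (pvGetA r "email")),
         ("status", display_value_port (pvGetA r "status")),
         ("primaryUnit", display_value_port (pvGetA r "primaryUnit")),
         ("assignedRoles", display_value_port (pvGetA r "assignedRoles")),
         ("details", build_user_specific_details_port r)] := by
  show _ = _
  simp only [pvColFuns, pvColKeys, List.map_cons, List.map_nil,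
    List.cons_append, List.nil_append, List.zip_cons_cons, List.zip_nil_right]
  rw [pvDisplay_eq, pvDisplay_eq, pvDisplay_eq, pvDisplay_eq, pvDisplay_eq,
      pvDisplay_eq, pvDisplay_eq, pvDetails_eq]
  rfl

-- ===== VERDICT (by name: the statement is the Claim_ definition above) =====
theorem build_user_display_rows_spec : Claim_equal_build_user_display_rows := by
  intro rows _
  unfold Spec_build_user_display_rows build_user_display_rows build_user_display_rows_alt
  have hcols :
      (pvColKeys.map (fun k => rows.map (fun r => pvDisplayB (pvGetB r k)))
        ++ [rows.map pvDetailsB])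
      = pvColFuns.map (fun f => rows.map f) := by
    simp [pvColFuns, List.map_map, Function.comp]
  simp only [hcols]
  rw [pvZip_columns pvColFuns (by simp [pvColFuns, pvColKeys]) rows]
  rw [List.map_map]
  refine (List.map_congr_left ?_).symm
  intro r _
  exact pvRow_eq r
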